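-- pv_equiv track=rewrite | github.com/joshuawendorf21310/Adaptix-EPCR-Service | backend/nemsis_test/ref/parse_dict.py | parse_attribute_pairs
-- ===== SOURCE A (Python) =====
-- ATTR_LABELS = (
--     "National Element",
--     "State Element",
--     "Version 2 Element",
--     "Pertinent Negatives (PN)",
--     "NOT Values",
--     "Is Nillable",
--     "Usage",
--     "Recurrence",
-- )
--
-- def parse_attribute_pairs(line: str) -> list[tuple[str, str]]:
--     """Split a line like 'National Element Yes Pertinent Negatives (PN) No' into pairs."""
--     pairs: list[tuple[str, str]] = []
--     remainder = line
--     while remainder: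
--         # Find the earliest known label in the remainder.
--         candidates = [(remainder.find(label), label) for label in ATTR_LABELS]
--         candidates = [(idx, lbl) for idx, lbl in candidates if idx >= 0]
--         if not candidates:
--             break
--         candidates.sort()
--         idx, label = candidates[0]
--         if idx > 0:
--             # Leading text is a value for the previous label; ignore here.
--             pass
--         # Find next label after this label position.
--         start_value = idx + len(label)
--         next_candidates = [
--             (remainder.find(lbl, start_value), lbl) for lbl in ATTR_LABELS if lbl != label
--         ]
--         next_candidates = [(j, lbl) for j, lbl in next_candidates if j >= 0]
--         next_idx = min(j for j, _ in next_candidates) if next_candidates else len(remainder)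
--         value = remainder[start_value:next_idx].strip()
--         pairs.append((label, value))
--         remainder = remainder[next_idx:].strip()
--     return pairs
-- ===== SOURCE B (Python) =====
-- ATTR_LABELS = (
--     "National Element",
--     "State Element",
--     "Version 2 Element",
--     "Pertinent Negatives (PN)",
--     "NOT Values",
--     "Is Nillable",
--     "Usage",
--     "Recurrence",
-- )
--
-- def parse_attribute_pairs(line: str) -> list[tuple[str, str]]:
--     """Split a line like 'National Element Yes Pertinent Negatives (PN) No' into pairs."""
--     # Index every occurrence of every known label, in position order, once.
--     occs = [(p, lbl) for p in range(len(line)) for lbl in ATTR_LABELS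
--             if line.startswith(lbl, p)]
--     pairs: list[tuple[str, str]] = []
--     while occs:
--         p, lbl = occs[0]
--         start = p + len(lbl)
--         # The value runs to the first occurrence of a *different* label at or
--         # after the end of the current label; same-label repeats are swallowed.
--         rest = occs[1:]
--         while rest and (rest[0][0] < start or rest[0][1] == lbl):
--             rest = rest[1:]
--         end = rest[0][0] if rest else len(line)
--         pairs.append((lbl, line[start:end].strip()))
--         occs = rest
--     return pairs
-- ===== Notes on version B (the rewrite author's own statement) =====
-- stated objective: alternative
-- what changed: B builds the complete (position,label) occurrence index of the line once, in position order, and emits all pairs in a single walk over that index, instead of A's loop that re-runs str.find for every label on a repeatedly re-sliced and re-stripped remainder.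
import Mathlib
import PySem

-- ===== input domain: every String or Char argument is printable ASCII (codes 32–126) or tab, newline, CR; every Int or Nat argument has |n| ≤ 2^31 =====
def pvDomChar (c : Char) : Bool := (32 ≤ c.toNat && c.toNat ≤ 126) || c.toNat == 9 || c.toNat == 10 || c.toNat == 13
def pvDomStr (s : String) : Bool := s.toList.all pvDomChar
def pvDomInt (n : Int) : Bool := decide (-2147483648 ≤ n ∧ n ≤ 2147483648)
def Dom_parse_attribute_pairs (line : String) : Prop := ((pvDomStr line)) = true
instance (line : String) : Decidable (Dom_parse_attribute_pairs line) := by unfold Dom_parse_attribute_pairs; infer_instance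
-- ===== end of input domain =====

-- B replaces A's repeated find-and-reslice loop by one position-ordered index of all
-- label occurrences built once and a single walk over it (objective: alternative).

-- ===== PORT A =====
def ATTR_LABELS : List String :=
  ["National Element", "State Element", "Version 2 Element", "Pertinent Negatives (PN)",
   "NOT Values", "Is Nillable", "Usage", "Recurrence"]

-- A's local `candidates` (after the `if idx >= 0` filter)
def pyCandidates (r : List Char) : List (Int × String) :=
  (ATTR_LABELS.map (fun label => (PySem.Chars.find r label.toList, label))).filter
    (fun p => decide (0 ≤ p.1))

-- A's local `next_candidates` (after the `if j >= 0` filter)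
def pyNextCandidates (r : List Char) (label : String) (start_value : Int) : List (Int × String) :=
  ((ATTR_LABELS.filter (fun lbl => decide (lbl ≠ label))).map
      (fun lbl => (PySem.Chars.findFrom r lbl.toList start_value none, lbl))).filter
    (fun p => decide (0 ≤ p.1))

-- A's local `next_idx`: min(j for j, _ in next_candidates) if next_candidates else len(remainder)
def pyNextIdx (r : List Char) (label : String) (start_value : Int) : Int :=
  match PySem.List.min? ((pyNextCandidates r label start_value).map (fun p => p.1)) (fun x => x) with
  | none => (r.length : Int)
  | some j => j

-- termination facts for pyA (cited by its decreasing_by)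
lemma pv_strip_length_le (s : List Char) : (PySem.Chars.strip s).length ≤ s.length := by
  simp only [PySem.Chars.strip, PySem.Chars.rstrip, PySem.Chars.lstrip, List.length_reverse]
  have h1 := List.length_dropWhile_le (p := PySem.Chars.isspace)
      (l := (List.dropWhile PySem.Chars.isspace s).reverse)
  have h2 := List.length_dropWhile_le (p := PySem.Chars.isspace) (l := s)
  simp only [List.length_reverse] at h1
  omega

lemma pv_cands_head (r : List Char) (idx : Int) (label : String) (t : List (Int × String))
    (hs : PySem.List.sorted2 (pyCandidates r) (fun p => p.1) (fun p => p.2) false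
          = (idx, label) :: t) :
    0 ≤ idx ∧ label ∈ ATTR_LABELS ∧ PySem.Chars.find r label.toList = idx := by
  have hmem : (idx, label) ∈ PySem.List.sorted2 (pyCandidates r)
      (fun p => p.1) (fun p => p.2) false := by rw [hs]; exact List.mem_cons_self
  have hmem2 : (idx, label) ∈ pyCandidates r :=
    (PySem.List.sorted2_perm _ _ _ _).mem_iff.mp hmem
  unfold pyCandidates at hmem2
  have h1 := List.of_mem_filter hmem2
  have h2 := List.mem_of_mem_filter hmem2
  simp only [List.mem_map] at h2
  obtain ⟨l, hl, heq⟩ := h2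
  cases heq
  exact ⟨by simpa using h1, hl, rfl⟩

lemma pv_find_bound (r : List Char) (l : List Char)
    (h : 0 ≤ PySem.Chars.find r l) :
    (PySem.Chars.find r l).toNat + l.length ≤ r.length := by
  obtain ⟨hpre, -⟩ := PySem.Chars.find_spec h
  have := hpre.length_le
  have h2 : (PySem.Chars.find r l).toNat ≤ r.length := by
    have := PySem.Chars.find_le_length (s := r) (sub := l)
    omega
  simp [List.length_drop] at this
  omega

lemma pv_labels_len_pos : ∀ l ∈ ATTR_LABELS, 0 < l.toList.length := by decide

lemma pv_nextIdx_one_le (r : List Char) (idx : Int) (label : String) (t : List (Int × String))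
    (hr : r ≠ [])
    (hs : PySem.List.sorted2 (pyCandidates r) (fun p => p.1) (fun p => p.2) false
          = (idx, label) :: t) :
    1 ≤ pyNextIdx r label (idx + (label.toList.length : Int)) := by
  obtain ⟨hidx, hlbl, hfind⟩ := pv_cands_head r idx label t hs
  have hlen := pv_labels_len_pos label hlbl
  have hfb := pv_find_bound r label.toList (by rw [hfind]; exact hidx)
  rw [hfind] at hfb
  have hstart : idx + (label.toList.length : Int)
      = ((idx.toNat + label.toList.length : Nat) : Int) := by push_cast; omega
  unfold pyNextIdx
  rcases hmin : PySem.List.min?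
      ((pyNextCandidates r label (idx + (label.toList.length : Int))).map (fun p => p.1))
      (fun x => x) with _ | j
  · simp only [hmin]
    have : 0 < r.length := List.length_pos_iff.mpr hr
    omega
  · simp only [hmin]
    have hjm := PySem.List.min?_mem hmin
    simp only [List.mem_map] at hjm
    obtain ⟨p, hp, hpj⟩ := hjm
    have h0j : (0:Int) ≤ p.1 := by simpa using List.of_mem_filter hp
    have hpm := List.mem_of_mem_filter hp
    simp only [List.mem_map] at hpm
    obtain ⟨l, hl', heq⟩ := hpm
    have hp1 : p.1 = PySem.Chars.findFrom r l.toList (idx + (label.toList.length : Int)) none := by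
      rw [← heq]
    have hne : PySem.Chars.findFrom r l.toList ((idx.toNat + label.toList.length : Nat) : Int) none ≠ -1 := by
      rw [← hstart, ← hp1]; omega
    have hge := (PySem.Chars.findFrom_natCast_spec r l.toList (idx.toNat + label.toList.length) hfb hne).1
    rw [← hpj, hp1, hstart]
    omega

lemma pv_pyA_dec (r : List Char) (idx : Int) (label : String) (t : List (Int × String))
    (hr : r ≠ [])
    (hs : PySem.List.sorted2 (pyCandidates r) (fun p => p.1) (fun p => p.2) false
          = (idx, label) :: t) :
    (PySem.Chars.strip (PySem.List.slice r
        (some (pyNextIdx r label (idx + (label.toList.length : Int)))) none)).length < r.length := by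
  have h1 := pv_nextIdx_one_le r idx label t hr hs
  rw [PySem.List.slice_from r (by omega : (0:Int) ≤ pyNextIdx r label (idx + (label.toList.length : Int)))]
  have h2 := pv_strip_length_le (List.drop (pyNextIdx r label (idx + (label.toList.length : Int))).toNat r)
  have h3 : 0 < r.length := List.length_pos_iff.mpr hr
  have h4 : 1 ≤ (pyNextIdx r label (idx + (label.toList.length : Int))).toNat := by omega
  rw [List.length_drop] at h2
  omega

def pyA (r : List Char) : List (String × String) :=
  if hr : r = [] then []
  else
    if hc : pyCandidates r = [] then []
    else
      match hs : PySem.List.sorted2 (pyCandidates r) (fun p => p.1) (fun p => p.2) false with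
      | [] => []   -- unreachable (sorting a non-empty list); mirrors the `break` shape
      | (idx, label) :: _ =>
        let start_value : Int := idx + (label.toList.length : Int)
        let next_idx : Int := pyNextIdx r label start_value
        let value : List Char := PySem.Chars.strip (PySem.List.slice r (some start_value) (some next_idx))
        (label, String.ofList value) :: pyA (PySem.Chars.strip (PySem.List.slice r (some next_idx) none))
termination_by r.length
decreasing_by exact pv_pyA_dec r idx label _ hr hs

def parse_attribute_pairs (line : String) : List (String × String) := pyA line.toList

-- ===== PORT B =====
-- Source B's occs: every (position, label) occurrence, built in position order.
-- line.startswith(lbl, p) for 0 ≤ p < len(line) is exactly "lbl is a prefix of line[p:]".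
def occsB (line : List Char) : List (Int × String) :=
  (PySem.List.pyRange 0 (line.length : Int) 1).flatMap
    (fun p =>
      (ATTR_LABELS.filter (fun lbl =>
          PySem.Chars.startswith (line.drop p.toNat) lbl.toList)).map
        (fun lbl => (p, lbl)))

-- Source B's inner while: drop occurrences before the value can end (too early or same label)
def altSkip (start : Int) (lbl : String) : List (Int × String) → List (Int × String)
  | [] => []
  | (q, l) :: rest => if q < start ∨ l = lbl then altSkip start lbl rest else (q, l) :: rest

lemma altSkip_length_le (start : Int) (lbl : String) :
    ∀ occs : List (Int × String), (altSkip start lbl occs).length ≤ occs.length := by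
  intro occs
  induction occs with
  | nil => simp [altSkip]
  | cons h t ih =>
    obtain ⟨q, l⟩ := h
    simp only [altSkip]
    split
    · exact Nat.le_succ_of_le ih
    · simp

-- Source B's outer while loop
def altGo (line : List Char) : List (Int × String) → List (String × String)
  | [] => []
  | (p, lbl) :: rest0 =>
    let start : Int := p + (lbl.toList.length : Int)
    let rest := altSkip start lbl rest0
    let end_ : Int := match rest with | [] => (line.length : Int) | (q, _) :: _ => q
    (lbl, String.ofList (PySem.Chars.strip (PySem.List.slice line (some start) (some end_)))) ::
      altGo line rest
termination_by occs => occs.length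
decreasing_by exact Nat.lt_succ_of_le (altSkip_length_le _ _ _)

def parse_attribute_pairs_alt (line : String) : List (String × String) :=
  altGo line.toList (occsB line.toList)

-- ===== PRECONDITION & SPEC =====
def Spec_parse_attribute_pairs (line : String) (out : List (String × String)) : Prop := out = parse_attribute_pairs_alt line
instance (line : String) (out : List (String × String)) : Decidable (Spec_parse_attribute_pairs line out) := by unfold Spec_parse_attribute_pairs; infer_instance

-- ===== CLAIM (what is proved, stated in full; the proofs are below) =====
def Claim_equal_parse_attribute_pairs : Prop := ∀ (line : String), Dom_parse_attribute_pairs line → Spec_parse_attribute_pairs line (parse_attribute_pairs line)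

-- ===== LEMMAS AND PROOFS =====

-- ---------- proof-side view of the occurrence structure ----------

-- the unique known label matching at position p (if any)
def lblAt (r : List Char) (p : Nat) : Option String :=
  ATTR_LABELS.find? (fun l => decide (l.toList <+: r.drop p))

-- all (position, label) occurrences, in position order
def occL (r : List Char) : List (Int × String) :=
  (List.range r.length).filterMap (fun p => (lblAt r p).map (fun l => ((p : Int), l)))

def occFrom (r : List Char) (k : Int) : List (Int × String) :=
  (occL r).filter (fun e => decide (k ≤ e.1))

-- ---------- facts about the eight labels (by computation) ----------

set_option maxRecDepth 8192 in
lemma labels_prefix_free : ∀ l1 ∈ ATTR_LABELS, ∀ l2 ∈ ATTR_LABELS,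
    l1.toList <+: l2.toList → l1 = l2 := by decide

set_option maxRecDepth 8192 in
lemma labels_first_not_ws : ∀ l ∈ ATTR_LABELS,
    l.toList.head?.map PySem.Chars.isspace = some false := by decide

set_option maxRecDepth 8192 in
lemma labels_last_not_ws : ∀ l ∈ ATTR_LABELS,
    l.toList.getLast?.map PySem.Chars.isspace = some false := by decide

-- ---------- lblAt / occL basics ----------

lemma label_match_unique (r : List Char) (p : Nat) (l1 l2 : String)
    (h1 : l1 ∈ ATTR_LABELS) (h2 : l2 ∈ ATTR_LABELS)
    (m1 : l1.toList <+: r.drop p) (m2 : l2.toList <+: r.drop p) : l1 = l2 := by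
  rcases List.prefix_or_prefix_of_prefix m1 m2 with h | h
  · exact labels_prefix_free _ h1 _ h2 h
  · exact (labels_prefix_free _ h2 _ h1 h).symm

lemma lblAt_eq_some_iff (r : List Char) (p : Nat) (l : String) :
    lblAt r p = some l ↔ l ∈ ATTR_LABELS ∧ l.toList <+: r.drop p := by
  constructor
  · intro h
    exact ⟨List.mem_of_find?_eq_some h, by simpa using List.find?_some h⟩
  · rintro ⟨hl, hm⟩
    cases hfind : lblAt r p with
    | none =>
      have := List.find?_eq_none.mp hfind l hl
      simp only [decide_eq_true_eq] at this
      exact absurd hm this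
    | some l' =>
      have hm' := List.mem_of_find?_eq_some hfind
      have hp' : l'.toList <+: r.drop p := by simpa using List.find?_some hfind
      rw [label_match_unique r p l' l hm' hl hp' hm]

lemma match_bound (r : List Char) (p : Nat) (l : String)
    (hl : l ∈ ATTR_LABELS) (hm : l.toList <+: r.drop p) :
    p + l.toList.length ≤ r.length ∧ 0 < l.toList.length := by
  have hlen := pv_labels_len_pos l hl
  have hle := hm.length_le
  rw [List.length_drop] at hle
  omega

lemma mem_occL_iff (r : List Char) (q : Int) (l : String) :
    (q, l) ∈ occL r ↔ 0 ≤ q ∧ l ∈ ATTR_LABELS ∧ l.toList <+: r.drop q.toNat := by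
  unfold occL
  rw [List.mem_filterMap]
  constructor
  · rintro ⟨p, hp, heq⟩
    rw [List.mem_range] at hp
    rcases ho : lblAt r p with _ | l'
    · rw [ho] at heq; simp at heq
    · rw [ho] at heq
      simp only [Option.map_some, Option.some_inj, Prod.mk.injEq] at heq
      obtain ⟨hq, hl⟩ := heq
      obtain ⟨hmem, hpre⟩ := (lblAt_eq_some_iff r p l').mp ho
      subst hl
      refine ⟨hq ▸ Int.natCast_nonneg p, hmem, ?_⟩
      rw [← hq]
      simpa using hpre
  · rintro ⟨hq, hl, hm⟩
    refine ⟨q.toNat, ?_, ?_⟩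
    · rw [List.mem_range]
      have := match_bound r q.toNat l hl hm
      omega
    · rw [(lblAt_eq_some_iff r q.toNat l).mpr ⟨hl, hm⟩]
      simp only [Option.map_some, Option.some_inj, Prod.mk.injEq]
      exact ⟨by omega, trivial⟩

lemma occL_pairwise (r : List Char) : (occL r).Pairwise (fun a b => a.1 < b.1) := by
  unfold occL
  rw [List.pairwise_filterMap]
  refine List.pairwise_lt_range.imp ?_
  rintro a b hab x hx y hy
  rcases ha : lblAt r a with _ | la <;> rw [ha] at hx <;> simp only [Option.map_some, Option.map_none] at hx
  · exact absurd hx (by simp)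
  rcases hb : lblAt r b with _ | lb <;> rw [hb] at hy <;> simp only [Option.map_some, Option.map_none] at hy
  · exact absurd hy (by simp)
  rw [Option.some_inj] at hx hy
  rw [← hx, ← hy]
  simpa using hab

lemma occFrom_pairwise (r : List Char) (k : Int) :
    (occFrom r k).Pairwise (fun a b => a.1 < b.1) := by
  exact (occL_pairwise r).filter _

-- ---------- the sorted2 head is lexicographically minimal ----------

def pvLtb (a b : Int × String) : Bool :=
  decide (a.1 < b.1) || (!decide (b.1 < a.1) && decide (a.2 < b.2))

lemma pvLtb_false_iff (a b : Int × String) :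
    pvLtb a b = false ↔ (b.1 ≤ a.1 ∧ (b.1 < a.1 ∨ b.2 ≤ a.2)) := by
  simp only [pvLtb, Bool.or_eq_false_iff, Bool.and_eq_false_iff, Bool.not_eq_false',
    decide_eq_false_iff_not, decide_eq_true_eq, not_lt]

lemma pvLtb_true_iff (a b : Int × String) :
    pvLtb a b = true ↔ (a.1 < b.1 ∨ (a.1 = b.1 ∧ a.2 < b.2)) := by
  simp only [pvLtb, Bool.or_eq_true, Bool.and_eq_true, Bool.not_eq_true',
    decide_eq_false_iff_not, decide_eq_true_eq, not_lt]
  constructor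
  · rintro (h | ⟨h1, h2⟩)
    · exact Or.inl h
    · rcases lt_or_eq_of_le h1 with h | h
      · exact Or.inl h
      · exact Or.inr ⟨h, h2⟩
  · rintro (h | ⟨h1, h2⟩)
    · exact Or.inl h
    · exact Or.inr ⟨le_of_eq h1, h2⟩

lemma pvLtb_irrefl (a : Int × String) : pvLtb a a = false := by
  simp [pvLtb]

lemma pvLtb_negtrans {a b c : Int × String} (h1 : pvLtb a b = false)
    (h2 : pvLtb b c = false) : pvLtb a c = false := by
  rw [pvLtb_false_iff] at *
  obtain ⟨hba, hd1⟩ := h1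
  obtain ⟨hcb, hd2⟩ := h2
  refine ⟨le_trans hcb hba, ?_⟩
  rcases hd1 with hd1 | hd1
  · exact Or.inl (lt_of_le_of_lt hcb hd1)
  · rcases hd2 with hd2 | hd2
    · exact Or.inl (lt_of_lt_of_le hd2 hba)
    · exact Or.inr (le_trans hd2 hd1)

lemma pvLtb_asym {a b : Int × String} (h : pvLtb a b = true) : pvLtb b a = false := by
  rw [pvLtb_true_iff] at h
  rw [pvLtb_false_iff]
  rcases h with h | ⟨h1, h2⟩
  · exact ⟨le_of_lt h, Or.inl h⟩
  · exact ⟨le_of_eq h1, Or.inr (le_of_lt h2)⟩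

lemma insertBy_pvLtb_pairwise (x : Int × String) (ys : List (Int × String))
    (h : ys.Pairwise (fun a b => pvLtb b a = false)) :
    (PySem.List.insertBy pvLtb x ys).Pairwise (fun a b => pvLtb b a = false) := by
  induction ys with
  | nil => simp [PySem.List.insertBy]
  | cons y t ih =>
    rw [PySem.List.insertBy]
    rcases List.pairwise_cons.mp h with ⟨hy, ht⟩
    by_cases hxy : pvLtb x y = true
    · rw [if_pos hxy]
      refine List.pairwise_cons.mpr ⟨?_, List.pairwise_cons.mpr ⟨hy, ht⟩⟩
      intro z hz
      rcases List.mem_cons.mp hz with rfl | hz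
      · exact pvLtb_asym hxy
      · exact pvLtb_negtrans (hy z hz) (pvLtb_asym hxy)
    · rw [if_neg hxy]
      refine List.pairwise_cons.mpr ⟨?_, ih ht⟩
      intro z hz
      rcases (PySem.List.mem_insertBy _ _ _ _).mp hz with rfl | hz
      · simpa using hxy
      · exact hy z hz

lemma sorted2_eq_foldl (xs : List (Int × String)) :
    PySem.List.sorted2 xs (fun p => p.1) (fun p => p.2) false
      = xs.foldl (fun acc x => PySem.List.insertBy pvLtb x acc) [] := rfl

lemma sorted2_head_min (xs : List (Int × String)) (m : Int × String) (t : List (Int × String))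
    (hs : PySem.List.sorted2 xs (fun p => p.1) (fun p => p.2) false = m :: t) :
    ∀ y ∈ xs, pvLtb y m = false := by
  have hpair : ∀ (l : List (Int × String)) (acc : List (Int × String)),
      acc.Pairwise (fun a b => pvLtb b a = false) →
      (l.foldl (fun acc x => PySem.List.insertBy pvLtb x acc) acc).Pairwise
        (fun a b => pvLtb b a = false) := by
    intro l
    induction l with
    | nil => intro acc h; simpa using h
    | cons z t ih => intro acc h; exact ih _ (insertBy_pvLtb_pairwise z acc h)
  have hp : (m :: t).Pairwise (fun a b => pvLtb b a = false) := by
    rw [← hs, sorted2_eq_foldl]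
    exact hpair xs [] (List.Pairwise.nil)
  have hperm : (m :: t).Perm xs := hs ▸ PySem.List.sorted2_perm xs _ _ _
  intro y hy
  rcases List.mem_cons.mp (hperm.mem_iff.mpr hy) with h | h
  · rw [h]; exact pvLtb_irrefl m
  · exact (List.pairwise_cons.mp hp).1 y (by simpa using h)

-- ---------- A's candidate selection picks the first occurrence ----------

lemma occ_infix (r : List Char) (p : Nat) (l : String) (hm : l.toList <+: r.drop p) :
    l.toList <:+: r :=
  hm.isInfix.trans (List.drop_suffix p r).isInfix

lemma find_mem_occL (r : List Char) (l : String) (hl : l ∈ ATTR_LABELS)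
    (h0 : 0 ≤ PySem.Chars.find r l.toList) :
    ((PySem.Chars.find r l.toList).toNat, l).1 = ((PySem.Chars.find r l.toList).toNat : Int) ∧
    (((PySem.Chars.find r l.toList).toNat : Int), l) ∈ occL r := by
  refine ⟨rfl, ?_⟩
  rw [mem_occL_iff]
  obtain ⟨hpre, -⟩ := PySem.Chars.find_spec h0
  exact ⟨Int.natCast_nonneg _, hl, by rw [Int.toNat_natCast]; exact hpre⟩

lemma occL_head_min (r : List Char) (q₀ : Int) (l₀ : String) (t : List (Int × String))
    (h : occL r = (q₀, l₀) :: t) : ∀ e ∈ occL r, q₀ ≤ e.1 := by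
  have hp := occL_pairwise r
  rw [h] at hp
  intro e he
  rw [h] at he
  rcases List.mem_cons.mp he with rfl | he
  · exact le_refl _
  · exact le_of_lt ((List.pairwise_cons.mp hp).1 e he)

lemma cands_empty_iff (r : List Char) : pyCandidates r = [] ↔ occL r = [] := by
  constructor
  · intro h
    rw [List.eq_nil_iff_forall_not_mem]
    rintro ⟨q, l⟩ hmem
    obtain ⟨hq, hl, hm⟩ := (mem_occL_iff r q l).mp hmem
    have hinf : l.toList <:+: r := occ_infix r q.toNat l hm
    have hfind : 0 ≤ PySem.Chars.find r l.toList := (PySem.Chars.find_nonneg_iff _ _).mpr hinf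
    have : (PySem.Chars.find r l.toList, l) ∈ pyCandidates r := by
      unfold pyCandidates
      rw [List.mem_filter]
      exact ⟨List.mem_map.mpr ⟨l, hl, rfl⟩, by simpa using hfind⟩
    rw [h] at this
    exact absurd this (List.not_mem_nil)
  · intro h
    unfold pyCandidates
    rw [List.filter_eq_nil_iff]
    rintro ⟨j, l⟩ hmem
    simp only [List.mem_map] at hmem
    obtain ⟨l', hl', heq⟩ := hmem
    obtain ⟨h1, h2⟩ := Prod.mk.injEq .. ▸ heq
    simp only [decide_eq_true_eq]
    intro h0
    rw [← h1] at h0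
    obtain ⟨-, hmem2⟩ := find_mem_occL r l' hl' h0
    rw [h] at hmem2
    exact absurd hmem2 (List.not_mem_nil)

lemma find_eq_head (r : List Char) (q₀ : Int) (l₀ : String) (t : List (Int × String))
    (h : occL r = (q₀, l₀) :: t) : PySem.Chars.find r l₀.toList = q₀ := by
  have hhead : (q₀, l₀) ∈ occL r := by rw [h]; exact List.mem_cons_self
  obtain ⟨hq0, hl0, hm0⟩ := (mem_occL_iff r q₀ l₀).mp hhead
  have hinf : l₀.toList <:+: r := occ_infix r q₀.toNat l₀ hm0
  have hfind : 0 ≤ PySem.Chars.find r l₀.toList := (PySem.Chars.find_nonneg_iff _ _).mpr hinf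
  obtain ⟨hpre, hmin⟩ := PySem.Chars.find_spec hfind
  -- find ≤ q₀ (first occurrence), and q₀ ≤ find (q₀ is the least occurrence position)
  have h1 : PySem.Chars.find r l₀.toList ≤ q₀ := by
    by_contra hcon
    push_neg at hcon
    exact hmin q₀.toNat (by omega) hm0
  obtain ⟨-, hmem2⟩ := find_mem_occL r l₀ hl0 hfind
  have h2 := occL_head_min r q₀ l₀ t h _ hmem2
  simp only at h2
  omega

lemma cands_min (r : List Char) (q₀ : Int) (l₀ : String) (t : List (Int × String))
    (h : occL r = (q₀, l₀) :: t) :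
    ∀ e ∈ pyCandidates r, q₀ ≤ e.1 ∧ (e.1 = q₀ → e = (q₀, l₀)) := by
  have hhead : (q₀, l₀) ∈ occL r := by rw [h]; exact List.mem_cons_self
  obtain ⟨hq0, hl0, hm0⟩ := (mem_occL_iff r q₀ l₀).mp hhead
  intro e hmem
  unfold pyCandidates at hmem
  rw [List.mem_filter] at hmem
  obtain ⟨hmap, hpos⟩ := hmem
  simp only [List.mem_map] at hmap
  obtain ⟨l', hl', heq⟩ := hmap
  subst heq
  simp only [decide_eq_true_eq] at hpos
  obtain ⟨-, hmem2⟩ := find_mem_occL r l' hl' hpos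
  have hge := occL_head_min r q₀ l₀ t h _ hmem2
  simp only at hge
  have hj : q₀ ≤ PySem.Chars.find r l'.toList := by omega
  refine ⟨hj, ?_⟩
  intro hjq
  simp only at hjq
  obtain ⟨hpre, -⟩ := PySem.Chars.find_spec hpos
  rw [hjq] at hpre
  have : l' = l₀ := label_match_unique r q₀.toNat l' l₀ hl' hl0 hpre hm0
  rw [Prod.mk.injEq]
  exact ⟨hjq, this⟩

lemma sorted2_cands_head (r : List Char) (q₀ : Int) (l₀ : String) (t : List (Int × String))
    (h : occL r = (q₀, l₀) :: t) :
    ∃ t', PySem.List.sorted2 (pyCandidates r) (fun p => p.1) (fun p => p.2) false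
          = (q₀, l₀) :: t' := by
  have hhead : (q₀, l₀) ∈ occL r := by rw [h]; exact List.mem_cons_self
  obtain ⟨hq0, hl0, hm0⟩ := (mem_occL_iff r q₀ l₀).mp hhead
  have hfind := find_eq_head r q₀ l₀ t h
  have hc : (q₀, l₀) ∈ pyCandidates r := by
    unfold pyCandidates
    rw [List.mem_filter]
    refine ⟨List.mem_map.mpr ⟨l₀, hl0, by rw [hfind]⟩, by simpa using hq0⟩
  rcases hsort : PySem.List.sorted2 (pyCandidates r) (fun p => p.1) (fun p => p.2) false with _ | ⟨m, t'⟩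
  · exfalso
    have hperm := PySem.List.sorted2_perm (pyCandidates r) (fun p : Int × String => p.1) (fun p => p.2) false
    rw [hsort] at hperm
    exact absurd (hperm.mem_iff.mpr hc) (List.not_mem_nil)
  · have hminb := sorted2_head_min (pyCandidates r) m t' hsort (q₀, l₀) hc
    rw [pvLtb_false_iff] at hminb
    have hmem : m ∈ pyCandidates r := by
      have hperm := PySem.List.sorted2_perm (pyCandidates r) (fun p : Int × String => p.1) (fun p => p.2) false
      rw [hsort] at hperm
      exact hperm.mem_iff.mp List.mem_cons_self
    obtain ⟨hge, heqc⟩ := cands_min r q₀ l₀ t h m hmem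
    have hm1 : m.1 = q₀ := le_antisymm (by simpa using hminb.1) hge
    exact ⟨t', by rw [← heqc hm1]⟩

-- ---------- A's next_idx equals B's boundary ----------

lemma altSkip_eq_dropWhile (start : Int) (lbl : String) (occs : List (Int × String)) :
    altSkip start lbl occs
      = occs.dropWhile (fun e => decide (e.1 < start) || decide (e.2 = lbl)) := by
  induction occs with
  | nil => rfl
  | cons e rest ih =>
    obtain ⟨q, l⟩ := e
    simp only [altSkip, List.dropWhile_cons]
    by_cases hc : q < start ∨ l = lbl
    · rw [if_pos hc, if_pos (by simpa using hc)]
      exact ih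
    · rw [if_neg hc, if_neg (by simpa using hc)]

lemma dropWhile_head_false {α : Type} (P : α → Bool) (xs : List α) (y : α) (ys : List α)
    (hd : xs.dropWhile P = y :: ys) : P y = false := by
  induction xs with
  | nil => simp at hd
  | cons a t ih =>
    rw [List.dropWhile_cons] at hd
    by_cases hp : P a = true
    · rw [if_pos hp] at hd; exact ih hd
    · rw [if_neg hp] at hd
      obtain ⟨h1, -⟩ := List.cons.injEq .. ▸ hd
      rw [← h1]
      simpa using hp

lemma dropWhile_sorted_filter {xs : List (Int × String)}
    (hsort : xs.Pairwise (fun a b => a.1 < b.1)) {P : Int × String → Bool}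
    {y : Int × String} {ys : List (Int × String)} (hd : xs.dropWhile P = y :: ys) :
    xs.filter (fun e => decide (y.1 ≤ e.1)) = y :: ys := by
  have hsplit : xs.takeWhile P ++ (y :: ys) = xs := by rw [← hd]; exact List.takeWhile_append_dropWhile
  rw [← hsplit] at hsort ⊢
  rw [List.pairwise_append] at hsort
  obtain ⟨-, hp2, hcross⟩ := hsort
  rw [List.filter_append]
  have h1 : (xs.takeWhile P).filter (fun e => decide (y.1 ≤ e.1)) = [] := by
    rw [List.filter_eq_nil_iff]
    intro a ha
    have := hcross a ha y List.mem_cons_self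
    simp only [decide_eq_true_eq]
    omega
  have h2 : (y :: ys).filter (fun e => decide (y.1 ≤ e.1)) = y :: ys := by
    rw [List.filter_cons_of_pos (by simp)]
    congr 1
    rw [List.filter_eq_self]
    intro b hb
    have := (List.pairwise_cons.mp hp2).1 b hb
    simp only [decide_eq_true_eq]
    omega
  rw [h1, h2, List.nil_append]

lemma nextIdx_eq (r : List Char) (q₀ : Int) (l₀ : String) (t : List (Int × String))
    (h : occL r = (q₀, l₀) :: t) :
    pyNextIdx r l₀ (q₀ + (l₀.toList.length : Int)) =
      (match altSkip (q₀ + (l₀.toList.length : Int)) l₀ t with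
       | [] => (r.length : Int)
       | (q, _) :: _ => q) := by
  have hhead : (q₀, l₀) ∈ occL r := by rw [h]; exact List.mem_cons_self
  obtain ⟨hq0, hl0, hm0⟩ := (mem_occL_iff r q₀ l₀).mp hhead
  obtain ⟨hbound, hlpos⟩ := match_bound r q₀.toNat l₀ hl0 hm0
  set start : Int := q₀ + (l₀.toList.length : Int) with hstart
  set k : Nat := q₀.toNat + l₀.toList.length with hk
  have hks : ((k : Nat) : Int) = start := by rw [hk, hstart]; push_cast; omega
  have hkle : k ≤ r.length := hbound
  have hq0start : q₀ < start := by rw [hstart]; omega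
  have htp : t.Pairwise (fun a b => a.1 < b.1) := by
    have := occL_pairwise r
    rw [h] at this
    exact (List.pairwise_cons.mp this).2
  -- membership of a label occurrence in t
  have hmem_t : ∀ (j : Int) (l : String), q₀ < j → (j, l) ∈ occL r → (j, l) ∈ t := by
    intro j l hj hjl
    rw [h] at hjl
    rcases List.mem_cons.mp hjl with heq | hmem
    · obtain ⟨h1, -⟩ := Prod.mk.injEq .. ▸ heq
      omega
    · exact hmem
  -- every j in next_candidates' fst list is a different-label occurrence position ≥ start in t
  have hA_occ : ∀ j ∈ (pyNextCandidates r l₀ start).map (fun p => p.1),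
      ∃ l, l ≠ l₀ ∧ start ≤ j ∧ (j, l) ∈ t := by
    intro j hj
    simp only [List.mem_map] at hj
    obtain ⟨p, hp, hpj⟩ := hj
    unfold pyNextCandidates at hp
    rw [List.mem_filter] at hp
    obtain ⟨hmap, hpos⟩ := hp
    simp only [List.mem_map] at hmap
    obtain ⟨l, hl, heq⟩ := hmap
    have hlmem : l ∈ ATTR_LABELS := List.mem_of_mem_filter hl
    have hlne : l ≠ l₀ := by simpa using List.of_mem_filter hl
    subst heq
    simp only [decide_eq_true_eq] at hpos
    simp only at hpj
    subst hpj
    rw [← hks] at hpos ⊢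
    have hne : PySem.Chars.findFrom r l.toList ((k : Nat) : Int) none ≠ -1 := by omega
    obtain ⟨hge, hpre, -⟩ := PySem.Chars.findFrom_natCast_spec r l.toList k hkle hne
    refine ⟨l, hlne, hge, ?_⟩
    refine hmem_t _ _ (by omega) ?_
    rw [mem_occL_iff]
    exact ⟨by omega, hlmem, hpre⟩
  -- every different-label occurrence in t at position ≥ start bounds some candidate from above
  have hB_cand : ∀ (j : Int) (l : String), l ≠ l₀ → start ≤ j → (j, l) ∈ t →
      ∃ j' ∈ (pyNextCandidates r l₀ start).map (fun p => p.1), j' ≤ j := by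
    intro j l hlne hsj hjt
    have hjocc : (j, l) ∈ occL r := by rw [h]; exact List.mem_cons_of_mem _ hjt
    obtain ⟨hj0, hlmem, hjm⟩ := (mem_occL_iff r j l).mp hjocc
    have hinf : l.toList <:+: r.drop k := by
      have : r.drop j.toNat = (r.drop k).drop (j.toNat - k) := by
        rw [List.drop_drop]
        congr 1
        omega
      rw [this] at hjm
      exact occ_infix (r.drop k) (j.toNat - k) l hjm
    have hne : PySem.Chars.findFrom r l.toList ((k : Nat) : Int) none ≠ -1 := by
      rw [Ne, PySem.Chars.findFrom_natCast_eq_neg_one_iff r l.toList k hkle]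
      simpa using hinf
    obtain ⟨hge, -, hmin⟩ := PySem.Chars.findFrom_natCast_spec r l.toList k hkle hne
    refine ⟨PySem.Chars.findFrom r l.toList ((k : Nat) : Int) none, ?_, ?_⟩
    · simp only [List.mem_map]
      refine ⟨(PySem.Chars.findFrom r l.toList start none, l), ?_, by rw [hks]⟩
      unfold pyNextCandidates
      rw [List.mem_filter]
      refine ⟨List.mem_map.mpr ⟨l, ?_, rfl⟩, ?_⟩
      · rw [List.mem_filter]
        exact ⟨hlmem, by simpa using hlne⟩
      · rw [← hks]
        simp only [decide_eq_true_eq]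
        omega
    · by_contra hcon
      push_neg at hcon
      exact absurd hjm (hmin j.toNat (by omega) (by omega))
  rcases hskip : altSkip start l₀ t with _ | ⟨⟨q₂, l₂⟩, ys⟩
  · -- no boundary anywhere: both sides give len(remainder)
    rw [altSkip_eq_dropWhile] at hskip
    have hall := List.dropWhile_eq_nil_iff.mp hskip
    have hnc : (pyNextCandidates r l₀ start).map (fun p => p.1) = [] := by
      rw [List.eq_nil_iff_forall_not_mem]
      intro j hj
      obtain ⟨l, hlne, hsj, hjt⟩ := hA_occ j hj
      have := hall (j, l) hjt
      simp only [Bool.or_eq_true, decide_eq_true_eq] at this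
      rcases this with h' | h'
      · omega
      · exact hlne h'
    unfold pyNextIdx
    rw [hnc]
    rfl
  · rw [altSkip_eq_dropWhile] at hskip
    have hPfalse := dropWhile_head_false _ t _ _ hskip
    simp only [Bool.or_eq_false_iff, decide_eq_false_iff_not] at hPfalse
    obtain ⟨hq2ge, hl2ne⟩ := hPfalse
    have hq2mem_t : (q₂, l₂) ∈ t := (hskip ▸ (List.dropWhile_suffix _)).subset List.mem_cons_self
    have hmin_t : ∀ e ∈ t, start ≤ e.1 → e.2 ≠ l₀ → q₂ ≤ e.1 := by
      intro e he hse hne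
      have hsplit : t.takeWhile (fun e => decide (e.1 < start) || decide (e.2 = l₀))
          ++ ((q₂, l₂) :: ys) = t := by
        rw [← hskip]; exact List.takeWhile_append_dropWhile
      rw [← hsplit] at he
      rcases List.mem_append.mp he with he | he
      · have := List.mem_takeWhile_imp he
        simp only [Bool.or_eq_true, decide_eq_true_eq] at this
        rcases this with h' | h'
        · omega
        · exact absurd h' hne
      · rcases List.mem_cons.mp he with heq | he
        · rw [heq]
        · have hp := htp
          rw [← hsplit, List.pairwise_append] at hp
          have := (List.pairwise_cons.mp hp.2.1).1 e he
          simp only at this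
          omega
    obtain ⟨j', hj'mem, hj'le⟩ := hB_cand q₂ l₂ hl2ne (by omega) hq2mem_t
    rcases hmn : PySem.List.min? ((pyNextCandidates r l₀ start).map (fun p => p.1)) (fun x => x)
      with _ | j
    · rw [(PySem.List.min?_eq_none_iff _ _).mp hmn] at hj'mem
      exact absurd hj'mem (List.not_mem_nil)
    · have hjmem := PySem.List.min?_mem hmn
      obtain ⟨l, hlne, hsj, hjt⟩ := hA_occ j hjmem
      have h1 : q₂ ≤ j := hmin_t (j, l) hjt hsj hlne
      have h2 : j ≤ q₂ := le_trans (PySem.List.min?_isMin hmn j' hj'mem) hj'le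
      unfold pyNextIdx
      rw [hmn]
      exact le_antisymm h2 h1

-- ---------- strip transport ----------

lemma dropWhile_append_of_all {p : Char → Bool} (x y : List Char)
    (h : ∀ c ∈ x, p c = true) : (x ++ y).dropWhile p = y.dropWhile p := by
  rw [List.dropWhile_append, List.dropWhile_eq_nil_iff.mpr h]
  simp

lemma strip_decomp (u : List Char) :
    ∃ w₂, u = u.takeWhile PySem.Chars.isspace ++ PySem.Chars.strip u ++ w₂ ∧
      (∀ c ∈ w₂, PySem.Chars.isspace c = true) := by
  refine ⟨(((u.dropWhile PySem.Chars.isspace).reverse.takeWhile PySem.Chars.isspace)).reverse,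
    ?_, ?_⟩
  · simp only [PySem.Chars.strip, PySem.Chars.rstrip, PySem.Chars.lstrip]
    conv_lhs => rw [← List.takeWhile_append_dropWhile
      (p := PySem.Chars.isspace) (l := u)]
    rw [List.append_assoc]
    congr 1
    set v := u.dropWhile PySem.Chars.isspace
    calc v = v.reverse.reverse := by rw [List.reverse_reverse]
    _ = (v.reverse.takeWhile PySem.Chars.isspace ++ v.reverse.dropWhile PySem.Chars.isspace).reverse := by
        rw [List.takeWhile_append_dropWhile]
    _ = (v.reverse.dropWhile PySem.Chars.isspace).reverse ++ (v.reverse.takeWhile PySem.Chars.isspace).reverse := by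
        rw [List.reverse_append]
  · intro c hc
    rw [List.mem_reverse] at hc
    exact List.mem_takeWhile_imp hc

lemma rstrip_append_ws (x w : List Char) (hw : ∀ c ∈ w, PySem.Chars.isspace c = true) :
    PySem.Chars.rstrip (x ++ w) = PySem.Chars.rstrip x := by
  simp only [PySem.Chars.rstrip, List.reverse_append]
  rw [dropWhile_append_of_all w.reverse x.reverse (fun c hc => hw c (List.mem_reverse.mp hc))]

lemma strip_append_ws (a w : List Char) (hw : ∀ c ∈ w, PySem.Chars.isspace c = true) :
    PySem.Chars.strip (a ++ w) = PySem.Chars.strip a := by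
  simp only [PySem.Chars.strip, PySem.Chars.lstrip]
  rw [List.dropWhile_append]
  by_cases he : (a.dropWhile PySem.Chars.isspace).isEmpty
  · rw [if_pos he]
    rw [List.dropWhile_eq_nil_iff.mpr hw]
    rw [List.isEmpty_iff] at he
    rw [he]
  · rw [if_neg he]
    exact rstrip_append_ws _ w hw

lemma prefix_getElem? {α : Type} {l₁ l₂ : List α} {i : Nat} (h : l₁ <+: l₂)
    (hi : i < l₁.length) : l₁[i]? = l₂[i]? := by
  obtain ⟨t, rfl⟩ := h
  rw [List.getElem?_append_left hi]

lemma match_ws_tail_iff (c w₂ : List Char) (hw2 : ∀ ch ∈ w₂, PySem.Chars.isspace ch = true)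
    (l : String) (hl : l ∈ ATTR_LABELS) (p : Nat) :
    l.toList <+: c.drop p ↔ l.toList <+: (c ++ w₂).drop p := by
  have hlpos := pv_labels_len_pos l hl
  constructor
  · intro hm
    by_cases hp : p ≤ c.length
    · rw [List.drop_append_of_le_length hp]
      exact hm.trans (List.prefix_append _ _)
    · rw [List.drop_eq_nil_of_le (by omega)] at hm
      rw [List.prefix_nil] at hm
      rw [hm] at hlpos
      simp at hlpos
  · intro hm
    by_cases hp : p ≤ c.length
    · rw [List.drop_append_of_le_length hp] at hm
      by_cases hfit : p + l.toList.length ≤ c.length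
      · have hrw := List.prefix_iff_eq_take.mp hm
        rw [List.take_append_of_le_length (by rw [List.length_drop]; omega)] at hrw
        rw [hrw]
        exact List.take_prefix _ _
      · exfalso
        have hlen := hm.length_le
        rw [List.length_append, List.length_drop] at hlen
        have hil : l.toList.length - 1 < l.toList.length := by omega
        have hq := prefix_getElem? hm hil
        rw [List.getElem?_append_right (by rw [List.length_drop]; omega)] at hq
        rw [List.getElem?_eq_getElem hil] at hq
        obtain ⟨ch, hch⟩ : ∃ ch, w₂[l.toList.length - 1 - (c.drop p).length]? = some ch :=
          ⟨_, hq.symm⟩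
        have hws := hw2 ch (List.mem_of_getElem? hch)
        have hlast := labels_last_not_ws l hl
        rw [List.getLast?_eq_getElem?, List.getElem?_eq_getElem hil] at hlast
        simp only [Option.map_some, Option.some_inj] at hlast
        rw [hch] at hq
        rw [Option.some_inj] at hq
        rw [hq, hws] at hlast
        simp at hlast
    · exfalso
      have heq2 : (c ++ w₂).drop p = w₂.drop (p - c.length) := by
        conv_lhs => rw [show p = c.length + (p - c.length) by omega]
        rw [List.drop_length_add_append]
      rw [heq2] at hm
      have hlen := hm.length_le
      have h0l : 0 < l.toList.length := hlpos
      have hq := prefix_getElem? hm (by omega : 0 < l.toList.length)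
      rw [List.getElem?_drop] at hq
      rw [List.getElem?_eq_getElem h0l] at hq
      obtain ⟨ch, hch⟩ : ∃ ch, w₂[p - c.length + 0]? = some ch := ⟨_, hq.symm⟩
      have hws := hw2 ch (List.mem_of_getElem? hch)
      have hfirst := labels_first_not_ws l hl
      rw [List.head?_eq_getElem?, List.getElem?_eq_getElem h0l] at hfirst
      simp only [Option.map_some, Option.some_inj] at hfirst
      rw [hch, Option.some_inj] at hq
      rw [hq, hws] at hfirst
      simp at hfirst

lemma match_strip_iff (u : List Char) (l : String) (hl : l ∈ ATTR_LABELS) (p : Nat) :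
    l.toList <+: (PySem.Chars.strip u).drop p ↔
      l.toList <+: u.drop ((u.takeWhile PySem.Chars.isspace).length + p) := by
  obtain ⟨w₂, hu, hw₂⟩ := strip_decomp u
  have h1 : u.drop ((u.takeWhile PySem.Chars.isspace).length + p)
      = (PySem.Chars.strip u ++ w₂).drop p := by
    calc u.drop ((u.takeWhile PySem.Chars.isspace).length + p)
        = (u.takeWhile PySem.Chars.isspace ++ (PySem.Chars.strip u ++ w₂)).drop
            ((u.takeWhile PySem.Chars.isspace).length + p) := by
          rw [← List.append_assoc, ← hu]
      _ = (PySem.Chars.strip u ++ w₂).drop p := List.drop_length_add_append _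
  rw [h1]
  exact match_ws_tail_iff (PySem.Chars.strip u) w₂ hw₂ l hl p

lemma no_match_in_ws (u : List Char) (l : String) (hl : l ∈ ATTR_LABELS) (i : Nat)
    (hi : i < (u.takeWhile PySem.Chars.isspace).length) : ¬ l.toList <+: u.drop i := by
  intro hmatch
  have hlpos := pv_labels_len_pos l hl
  have hq := prefix_getElem? hmatch (by omega : 0 < l.toList.length)
  rw [List.getElem?_drop, List.getElem?_eq_getElem hlpos, Nat.add_zero] at hq
  have h2 : (u.takeWhile PySem.Chars.isspace)[i]? = u[i]? :=
    prefix_getElem? (List.takeWhile_prefix _) hi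
  rw [← h2, List.getElem?_eq_getElem hi, Option.some_inj] at hq
  have hws := List.mem_takeWhile_imp (List.getElem_mem hi)
  have hfirst := labels_first_not_ws l hl
  rw [List.head?_eq_getElem?, List.getElem?_eq_getElem hlpos] at hfirst
  simp only [Option.map_some, Option.some_inj] at hfirst
  rw [hq, hws] at hfirst
  simp at hfirst

lemma occL_strip_drop (r : List Char) (m : Nat) (hm : m ≤ r.length) :
    occL (PySem.Chars.strip (r.drop m)) =
      (occFrom r (m : Int)).map
        (fun e => (e.1 - ((m + ((r.drop m).takeWhile PySem.Chars.isspace).length : Nat) : Int), e.2)) := by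
  have hnd1 : (occL (PySem.Chars.strip (r.drop m))).Nodup :=
    (occL_pairwise _).imp (fun {a b} h => by intro he; rw [he] at h; omega)
  have hpw2 : ((occFrom r (m : Int)).map
      (fun e => (e.1 - ((m + ((r.drop m).takeWhile PySem.Chars.isspace).length : Nat) : Int), e.2))).Pairwise
      (fun a b => a.1 < b.1) := by
    rw [List.pairwise_map]
    exact (occFrom_pairwise r m).imp (fun {a b} h => by simp only; omega)
  have hnd2 : ((occFrom r (m : Int)).map
      (fun e => (e.1 - ((m + ((r.drop m).takeWhile PySem.Chars.isspace).length : Nat) : Int), e.2))).Nodup :=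
    hpw2.imp (fun {a b} h => by intro he; rw [he] at h; omega)
  apply List.eq_of_perm_of_sorted
    (fun a b _ _ h1 h2 => absurd h2 (by omega)) (occL_pairwise _) hpw2
  rw [List.perm_ext_iff_of_nodup hnd1 hnd2]
  rintro ⟨q, l⟩
  constructor
  · intro hmem
    obtain ⟨hq0, hl, hmt⟩ := (mem_occL_iff _ q l).mp hmem
    rw [match_strip_iff (r.drop m) l hl q.toNat] at hmt
    rw [List.drop_drop] at hmt
    have hidx : m + (((r.drop m).takeWhile PySem.Chars.isspace).length + q.toNat)
        = m + ((r.drop m).takeWhile PySem.Chars.isspace).length + q.toNat := by omega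
    rw [hidx] at hmt
    rw [List.mem_map]
    refine ⟨(((m + ((r.drop m).takeWhile PySem.Chars.isspace).length + q.toNat : Nat) : Int), l),
      ?_, ?_⟩
    · unfold occFrom
      rw [List.mem_filter]
      refine ⟨(mem_occL_iff r _ l).mpr ⟨Int.natCast_nonneg _, hl, ?_⟩, ?_⟩
      · rw [Int.toNat_natCast]
        exact hmt
      · simp only [decide_eq_true_eq]
        push_cast
        omega
    · simp only [Prod.mk.injEq, and_true]
      push_cast
      omega
  · intro hmem
    rw [List.mem_map] at hmem
    obtain ⟨⟨q', l'⟩, he, heq⟩ := hmem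
    simp only [Prod.mk.injEq] at heq
    obtain ⟨hq, hl'⟩ := heq
    subst hl'
    unfold occFrom at he
    rw [List.mem_filter] at he
    obtain ⟨he1, he2⟩ := he
    simp only [decide_eq_true_eq] at he2
    obtain ⟨hq'0, hlm, hmt⟩ := (mem_occL_iff r q' l').mp he1
    set d : Nat := ((r.drop m).takeWhile PySem.Chars.isspace).length with hd
    -- q' cannot fall in the leading-whitespace window [m, m+d)
    have hge : (m + d : Int) ≤ q' := by
      by_contra hcon
      push_neg at hcon
      have hi : q'.toNat - m < d := by omega
      refine no_match_in_ws (r.drop m) l' hlm (q'.toNat - m) hi ?_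
      rw [List.drop_drop]
      have : m + (q'.toNat - m) = q'.toNat := by omega
      rw [this]
      exact hmt
    have hq0 : 0 ≤ q := by omega
    refine (mem_occL_iff _ q l').mpr ⟨hq0, hlm, ?_⟩
    rw [match_strip_iff (r.drop m) l' hlm q.toNat, List.drop_drop]
    have hidx : m + (d + q.toNat) = q'.toNat := by omega
    rw [← hd, hidx]
    exact hmt

lemma altSkip_map_shift (δ s : Int) (lbl : String) (xs : List (Int × String)) :
    altSkip (s - δ) lbl (xs.map (fun e => (e.1 - δ, e.2)))
      = (altSkip s lbl xs).map (fun e => (e.1 - δ, e.2)) := by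
  induction xs with
  | nil => rfl
  | cons e rest ih =>
    obtain ⟨q, l⟩ := e
    simp only [List.map_cons, altSkip]
    by_cases hc : q < s ∨ l = lbl
    · rw [if_pos (Or.imp (fun h => by omega) id hc), if_pos hc]
      exact ih
    · rw [if_neg (fun h => hc (Or.imp (fun h' => by omega) id h)), if_neg hc]
      rfl

-- every occurrence at ≥ m actually lies past the leading whitespace of r[m:]
lemma occFrom_ge_ws (r : List Char) (m : Nat) (q : Int) (l : String)
    (h : (q, l) ∈ occFrom r (m : Int)) :
    ((m + ((r.drop m).takeWhile PySem.Chars.isspace).length : Nat) : Int) ≤ q := by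
  unfold occFrom at h
  rw [List.mem_filter] at h
  obtain ⟨h1, h2⟩ := h
  simp only [decide_eq_true_eq] at h2
  obtain ⟨hq0, hlm, hmt⟩ := (mem_occL_iff r q l).mp h1
  by_contra hcon
  push_neg at hcon
  refine no_match_in_ws (r.drop m) l hlm (q.toNat - m) (by omega) ?_
  rw [List.drop_drop]
  have : m + (q.toNat - m) = q.toNat := by omega
  rw [this]
  exact hmt

-- one-step equation for altGo on a cons cell
lemma altGo_cons (line : List Char) (p : Int) (lbl : String) (rest0 : List (Int × String)) :
    altGo line ((p, lbl) :: rest0) =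
      (lbl, String.ofList (PySem.Chars.strip (PySem.List.slice line
        (some (p + (lbl.toList.length : Int)))
        (some (match altSkip (p + (lbl.toList.length : Int)) lbl rest0 with
               | [] => (line.length : Int) | (q, _) :: _ => q))))) ::
      altGo line (altSkip (p + (lbl.toList.length : Int)) lbl rest0) := by
  rw [altGo]

lemma altGo_nil (line : List Char) : altGo line [] = [] := by rw [altGo]

lemma toNat_shift_eq (q₂ sL δ : Int) (cl L₂ : Nat) (h1 : sL ≤ q₂) (h2 : δ ≤ sL)
    (h0 : 0 ≤ δ) (h3 : (q₂ - δ).toNat + L₂ ≤ cl) :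
    q₂.toNat - sL.toNat = (q₂ - δ).toNat - (sL - δ).toNat ∧
      q₂.toNat - sL.toNat ≤ cl - (sL - δ).toNat := by omega

lemma altGo_shift : ∀ (n : Nat) (r : List Char) (m : Nat), m ≤ r.length →
    (occFrom r (m : Int)).length ≤ n →
    altGo r (occFrom r (m : Int))
      = altGo (PySem.Chars.strip (r.drop m)) (occL (PySem.Chars.strip (r.drop m))) := by
  intro n
  induction n with
  | zero =>
    intro r m hm hlen
    have h0 : occFrom r (m : Int) = [] := List.eq_nil_of_length_eq_zero (by omega)
    rw [occL_strip_drop r m hm, h0]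
    simp only [List.map_nil]
    rw [altGo_nil, altGo_nil]
  | succ n ih =>
    intro r m hm hlen
    rw [occL_strip_drop r m hm]
    rcases hocc : occFrom r (m : Int) with _ | ⟨⟨q, l⟩, rest0⟩
    · simp only [List.map_nil]
      rw [altGo_nil, altGo_nil]
    · obtain ⟨w₂, hu, hw₂⟩ := strip_decomp (r.drop m)
      set dd : Nat := ((r.drop m).takeWhile PySem.Chars.isspace).length with hdd
      set δ : Int := ((m + dd : Nat) : Int) with hδ
      set c : List Char := PySem.Chars.strip (r.drop m) with hc
      -- r past the whitespace window is c ++ w₂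
      have h3 : r.drop (m + dd) = c ++ w₂ := by
        have h2 := congrArg (List.drop dd) hu
        rw [List.append_assoc, List.drop_left] at h2
        rw [List.drop_drop] at h2
        exact h2
      -- facts about the head occurrence
      have hqmem : (q, l) ∈ occFrom r (m : Int) := by rw [hocc]; exact List.mem_cons_self
      have hδq : δ ≤ q := occFrom_ge_ws r m q l hqmem
      have hqoccL : (q, l) ∈ occL r := List.mem_of_mem_filter hqmem
      obtain ⟨hq0, hlmem, hmt⟩ := (mem_occL_iff r q l).mp hqoccL
      obtain ⟨hbound, hlpos⟩ := match_bound r q.toNat l hlmem hmt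
      have hqcc : (q - δ, l) ∈ occL c := by
        rw [occL_strip_drop r m hm, List.mem_map]
        exact ⟨(q, l), hqmem, rfl⟩
      obtain ⟨hqc0, -, hmtc⟩ := (mem_occL_iff c (q - δ) l).mp hqcc
      obtain ⟨hboundc, -⟩ := match_bound c (q - δ).toNat l hlmem hmtc
      -- both sides unfold one step
      rw [List.map_cons, altGo_cons, altGo_cons]
      set sL : Int := q + (l.toList.length : Int) with hsL
      have hsk2 : altSkip (q - δ + (l.toList.length : Int)) l
          (rest0.map (fun e => (e.1 - δ, e.2)))
          = (altSkip sL l rest0).map (fun e => (e.1 - δ, e.2)) := by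
        rw [show q - δ + (l.toList.length : Int) = sL - δ by rw [hsL]; ring]
        exact altSkip_map_shift δ sL l rest0
      rw [hsk2]
      rw [show q - δ + (l.toList.length : Int) = sL - δ by rw [hsL]; ring]
      -- pairwise facts
      have hpair := occFrom_pairwise r (m : Int)
      rw [hocc] at hpair
      obtain ⟨hheadlt, hpair0⟩ := List.pairwise_cons.mp hpair
      rcases hskip : altSkip sL l rest0 with _ | ⟨⟨q₂, l₂⟩, ys⟩
      · -- no boundary: both emit the final pair and stop
        simp only [List.map_nil]
        have hsLc : (sL - δ).toNat ≤ c.length := by omega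
        have hdropeq : r.drop sL.toNat = c.drop (sL - δ).toNat ++ w₂ := by
          have h4 : r.drop sL.toNat = (r.drop (m + dd)).drop (sL.toNat - (m + dd)) := by
            rw [List.drop_drop]
            congr 1
            omega
          rw [h4, h3, show sL.toNat - (m + dd) = (sL - δ).toNat by omega,
              List.drop_append_of_le_length hsLc]
        have hval : PySem.Chars.strip (PySem.List.slice r (some sL) (some (r.length : Int)))
            = PySem.Chars.strip (PySem.List.slice c (some (sL - δ)) (some (c.length : Int))) := by
          rw [PySem.List.slice_toNat r (by omega) (by omega),
              PySem.List.slice_toNat c (by omega) (by omega)]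
          rw [List.take_of_length_le (by rw [List.length_drop]; omega),
              List.take_of_length_le (by rw [List.length_drop]; omega)]
          rw [hdropeq]
          exact strip_append_ws _ w₂ hw₂
        rw [hval, altGo_nil, altGo_nil]
      · -- boundary (q₂, l₂)
        simp only [List.map_cons]
        have hq₂rest : (q₂, l₂) ∈ rest0 := by
          have hsuf : (q₂, l₂) :: ys <:+ rest0 := by
            rw [← hskip, altSkip_eq_dropWhile]
            exact List.dropWhile_suffix _
          exact hsuf.subset List.mem_cons_self
        have hq₂mem : (q₂, l₂) ∈ occFrom r (m : Int) := by
          rw [hocc]; exact List.mem_cons_of_mem _ hq₂rest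
        have hδq₂ : δ ≤ q₂ := occFrom_ge_ws r m q₂ l₂ hq₂mem
        have hq₂occL : (q₂, l₂) ∈ occL r := List.mem_of_mem_filter hq₂mem
        obtain ⟨hq₂0, hl₂mem, hmt₂⟩ := (mem_occL_iff r q₂ l₂).mp hq₂occL
        obtain ⟨hbound₂, hl₂pos⟩ := match_bound r q₂.toNat l₂ hl₂mem hmt₂
        have hq₂cc : (q₂ - δ, l₂) ∈ occL c := by
          rw [occL_strip_drop r m hm, List.mem_map]
          exact ⟨(q₂, l₂), hq₂mem, rfl⟩
        obtain ⟨hq₂c0, -, hmtc₂⟩ := (mem_occL_iff c (q₂ - δ) l₂).mp hq₂cc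
        obtain ⟨hboundc₂, -⟩ := match_bound c (q₂ - δ).toNat l₂ hl₂mem hmtc₂
        have hq₂head := dropWhile_head_false _ rest0 _ _ (altSkip_eq_dropWhile sL l rest0 ▸ hskip)
        simp only [Bool.or_eq_false_iff, decide_eq_false_iff_not] at hq₂head
        obtain ⟨hq₂sL, -⟩ := hq₂head
        have hq₂ge : sL ≤ q₂ := not_lt.mp hq₂sL
        have hqq₂ : q < q₂ := hheadlt (q₂, l₂) hq₂rest
        -- the two value slices are literally the same characters
        have hsLc : (sL - δ).toNat ≤ c.length := by omega
        have hdropeq : r.drop sL.toNat = c.drop (sL - δ).toNat ++ w₂ := by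
          have h4 : r.drop sL.toNat = (r.drop (m + dd)).drop (sL.toNat - (m + dd)) := by
            rw [List.drop_drop]
            congr 1
            omega
          rw [h4, h3, show sL.toNat - (m + dd) = (sL - δ).toNat by omega,
              List.drop_append_of_le_length hsLc]
        have hδsL : δ ≤ sL :=
          le_trans hδq (by rw [hsL]; exact le_add_of_nonneg_right (Int.natCast_nonneg _))
        have hδ0 : 0 ≤ δ := by rw [hδ]; exact Int.natCast_nonneg _
        obtain ⟨hcnt, hfit⟩ := toNat_shift_eq q₂ sL δ c.length l₂.toList.length
          hq₂ge hδsL hδ0 hboundc₂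
        have hval : PySem.Chars.strip (PySem.List.slice r (some sL) (some q₂))
            = PySem.Chars.strip (PySem.List.slice c (some (sL - δ)) (some (q₂ - δ))) := by
          rw [PySem.List.slice_toNat r (le_trans hδ0 hδsL) (le_trans (le_trans hδ0 hδsL) hq₂ge),
              PySem.List.slice_toNat c (sub_nonneg.mpr hδsL)
                (sub_nonneg.mpr (le_trans hδsL hq₂ge))]
          rw [hdropeq]
          rw [List.take_append_of_le_length (by rw [List.length_drop]; exact hfit), ← hcnt]
        rw [hval]
        congr 1
        -- tails: restL = occFrom r q₂ and its shift = occFrom c (q₂ - δ)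
        have hfiltercongr : (occL r).filter (fun e => decide (q₂ ≤ e.1))
            = ((occL r).filter (fun e => decide ((m : Int) ≤ e.1))).filter
                (fun e => decide (q₂ ≤ e.1)) := by
          rw [List.filter_filter]
          refine (List.filter_congr ?_).symm
          intro e he
          by_cases h' : q₂ ≤ e.1
          · simp [h', (by omega : (m : Int) ≤ e.1)]
          · simp [h']
        have hoccq₂ : occFrom r q₂ = (q₂, l₂) :: ys := by
          unfold occFrom
          rw [hfiltercongr]
          have : (occL r).filter (fun e => decide ((m : Int) ≤ e.1)) = (q, l) :: rest0 := hocc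
          rw [this]
          rw [List.filter_cons_of_neg (by simp only [decide_eq_true_eq]; omega)]
          exact dropWhile_sorted_filter hpair0 (altSkip_eq_dropWhile sL l rest0 ▸ hskip)
        have hoccq₂c : occFrom c (q₂ - δ) = ((q₂, l₂) :: ys).map (fun e => (e.1 - δ, e.2)) := by
          unfold occFrom
          rw [occL_strip_drop r m hm]
          rw [List.filter_map]
          have hcongr2 : (occFrom r (m : Int)).filter
              ((fun e => decide (q₂ - δ ≤ e.1)) ∘ (fun e => (e.1 - δ, e.2)))
              = (occFrom r (m : Int)).filter (fun e => decide (q₂ ≤ e.1)) := by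
            refine List.filter_congr ?_
            intro e he
            simp only [Function.comp]
            by_cases h' : q₂ ≤ e.1
            · simp [h', (by omega : q₂ - δ ≤ e.1 - δ)]
            · simp [(by omega : ¬ q₂ - δ ≤ e.1 - δ), h']
          rw [hcongr2]
          congr 1
          rw [hocc]
          rw [List.filter_cons_of_neg (by simp only [decide_eq_true_eq]; omega)]
          exact dropWhile_sorted_filter hpair0 (altSkip_eq_dropWhile sL l rest0 ▸ hskip)
        have hlen₂ : ((q₂, l₂) :: ys).length ≤ n := by
          have h5 : ((q₂, l₂) :: ys).length ≤ rest0.length := by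
            rw [← hskip]
            exact altSkip_length_le _ _ _
          have h6 : ((q, l) :: rest0).length ≤ n + 1 := by rw [← hocc]; exact hlen
          simp only [List.length_cons] at h5 h6 ⊢
          omega
        have hq₂cast : ((q₂.toNat : Nat) : Int) = q₂ := by omega
        have hq₂ccast : (((q₂ - δ).toNat : Nat) : Int) = q₂ - δ := by omega
        have ihL := ih r q₂.toNat (by omega) (by rw [hq₂cast, hoccq₂]; exact hlen₂)
        have ihR := ih c (q₂ - δ).toNat (by omega) (by rw [hq₂ccast, hoccq₂c]; simpa using hlen₂)
        rw [hq₂cast, hoccq₂] at ihL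
        rw [hq₂ccast, hoccq₂c] at ihR
        simp only [List.map_cons] at ihR
        rw [ihL, ihR]
        -- the two recursion bases describe the same stripped tail
        have hdropeq₂ : r.drop q₂.toNat = c.drop (q₂ - δ).toNat ++ w₂ := by
          have h4 : r.drop q₂.toNat = (r.drop (m + dd)).drop (q₂.toNat - (m + dd)) := by
            rw [List.drop_drop]
            congr 1
            omega
          rw [h4, h3, show q₂.toNat - (m + dd) = (q₂ - δ).toNat by omega,
              List.drop_append_of_le_length (by omega)]
        have hstripeq : PySem.Chars.strip (r.drop q₂.toNat)
            = PySem.Chars.strip (c.drop (q₂ - δ).toNat) := by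
          rw [hdropeq₂]
          exact strip_append_ws _ w₂ hw₂
        rw [hstripeq]

-- ---------- main equivalence ----------

lemma occL_nil : occL ([] : List Char) = [] := rfl

lemma strip_nil : PySem.Chars.strip ([] : List Char) = [] := rfl

lemma pyA_nil : pyA [] = [] := by
  rw [pyA]
  simp

lemma pyA_nocands (r : List Char) (hr : r ≠ []) (hc : pyCandidates r = []) : pyA r = [] := by
  rw [pyA, dif_neg hr, dif_pos hc]

lemma pyA_step (r : List Char) (q₀ : Int) (l₀ : String) (t' : List (Int × String))
    (hr : r ≠ []) (hc : pyCandidates r ≠ [])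
    (hs : PySem.List.sorted2 (pyCandidates r) (fun p => p.1) (fun p => p.2) false
          = (q₀, l₀) :: t') :
    pyA r = (l₀, String.ofList (PySem.Chars.strip (PySem.List.slice r
        (some (q₀ + (l₀.toList.length : Int)))
        (some (pyNextIdx r l₀ (q₀ + (l₀.toList.length : Int))))))) ::
      pyA (PySem.Chars.strip (PySem.List.slice r
        (some (pyNextIdx r l₀ (q₀ + (l₀.toList.length : Int)))) none)) := by
  rw [pyA, dif_neg hr, dif_neg hc]
  split
  · rename_i heq
    rw [hs] at heq
    cases heq
  · rename_i idx label rest heq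
    rw [hs] at heq
    obtain ⟨h1, h2⟩ := List.cons.injEq .. ▸ heq
    obtain ⟨h3, h4⟩ := Prod.mk.injEq .. ▸ h1
    subst h3 h4
    rfl

lemma pyA_eq_altGo : ∀ (n : Nat) (r : List Char), r.length ≤ n →
    pyA r = altGo r (occL r) := by
  intro n
  induction n with
  | zero =>
    intro r hlen
    have hr : r = [] := List.eq_nil_of_length_eq_zero (by omega)
    subst hr
    rw [pyA_nil, occL_nil, altGo_nil]
  | succ n ih =>
    intro r hlen
    by_cases hr : r = []
    · subst hr
      rw [pyA_nil, occL_nil, altGo_nil]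
    rcases hocc : occL r with _ | ⟨⟨q₀, l₀⟩, t⟩
    · have hc : pyCandidates r = [] := (cands_empty_iff r).mpr hocc
      rw [pyA_nocands r hr hc, altGo_nil]
    · have hc : pyCandidates r ≠ [] := by
        intro h
        rw [(cands_empty_iff r).mp h] at hocc
        cases hocc
      obtain ⟨t', hs⟩ := sorted2_cands_head r q₀ l₀ t hocc
      -- head facts
      have hhead : (q₀, l₀) ∈ occL r := by rw [hocc]; exact List.mem_cons_self
      obtain ⟨hq00, hl0mem, hmt0⟩ := (mem_occL_iff r q₀ l₀).mp hhead
      obtain ⟨hbound0, hl0pos⟩ := match_bound r q₀.toNat l₀ hl0mem hmt0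
      rw [pyA_step r q₀ l₀ t' hr hc hs, altGo_cons, nextIdx_eq r q₀ l₀ t hocc]
      have htp : t.Pairwise (fun a b => a.1 < b.1) := by
        have := occL_pairwise r
        rw [hocc] at this
        exact (List.pairwise_cons.mp this).2
      have hheadlt : ∀ e ∈ t, q₀ < e.1 := by
        have := occL_pairwise r
        rw [hocc] at this
        exact fun e he => (List.pairwise_cons.mp this).1 e he
      rcases hskip : altSkip (q₀ + (l₀.toList.length : Int)) l₀ t with _ | ⟨⟨q₂, l₂⟩, ys⟩
      · -- no further label: tail is empty on both sides
        congr 1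
        have hsl : PySem.List.slice r (some ((r.length : Nat) : Int)) none = [] := by
          rw [PySem.List.slice_from r (by omega)]
          exact List.drop_eq_nil_of_le (by omega)
        rw [hsl, strip_nil, pyA_nil, altGo_nil]
      · -- boundary q₂: both sides continue at q₂
        congr 1
        have hq₂t : (q₂, l₂) ∈ t := by
          have hsuf : (q₂, l₂) :: ys <:+ t := by
            rw [← hskip, altSkip_eq_dropWhile]
            exact List.dropWhile_suffix _
          exact hsuf.subset List.mem_cons_self
        have hq₂occL : (q₂, l₂) ∈ occL r := by rw [hocc]; exact List.mem_cons_of_mem _ hq₂t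
        obtain ⟨hq₂0, hl₂mem, hmt₂⟩ := (mem_occL_iff r q₂ l₂).mp hq₂occL
        obtain ⟨hbound₂, hl₂pos⟩ := match_bound r q₂.toNat l₂ hl₂mem hmt₂
        have hq₂head := dropWhile_head_false _ t _ _
          (altSkip_eq_dropWhile (q₀ + (l₀.toList.length : Int)) l₀ t ▸ hskip)
        simp only [Bool.or_eq_false_iff, decide_eq_false_iff_not] at hq₂head
        obtain ⟨hq₂sL, -⟩ := hq₂head
        have hq₂ge : q₀ + (l₀.toList.length : Int) ≤ q₂ := not_lt.mp hq₂sL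
        -- (q₂, l₂) :: ys is exactly occFrom r q₂
        have hoccq₂ : occFrom r q₂ = (q₂, l₂) :: ys := by
          unfold occFrom
          have hfc : (occL r).filter (fun e => decide (q₂ ≤ e.1))
              = ((q₀, l₀) :: t).filter (fun e => decide (q₂ ≤ e.1)) := by rw [hocc]
          rw [hfc, List.filter_cons_of_neg (by simp only [decide_eq_true_eq]; omega)]
          exact dropWhile_sorted_filter htp
            (altSkip_eq_dropWhile (q₀ + (l₀.toList.length : Int)) l₀ t ▸ hskip)
        have hq₂cast : ((q₂.toNat : Nat) : Int) = q₂ := by omega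
        -- rewrite the slice into a drop
        rw [PySem.List.slice_from r (by omega)]
        -- left: the recursive pyA call, by the induction hypothesis
        have hlenstrip : (PySem.Chars.strip (r.drop q₂.toNat)).length ≤ n := by
          have h1 := pv_strip_length_le (r.drop q₂.toNat)
          rw [List.length_drop] at h1
          omega
        rw [ih (PySem.Chars.strip (r.drop q₂.toNat)) hlenstrip]
        -- right: altGo over occFrom r q₂, by the shift lemma
        have hshift := altGo_shift (occFrom r ((q₂.toNat : Nat) : Int)).length r q₂.toNat
          (by omega) le_rfl
        rw [hq₂cast, hoccq₂] at hshift
        rw [← hshift]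

lemma filter_unique {α : Type} (L : List α) (P : α → Bool) (hnd : L.Nodup)
    (h : ∀ a ∈ L, ∀ b ∈ L, P a = true → P b = true → a = b) :
    L.filter P = (L.find? P).toList := by
  induction L with
  | nil => rfl
  | cons a t ih =>
    obtain ⟨hna, hndt⟩ := List.nodup_cons.mp hnd
    by_cases hp : P a = true
    · rw [List.filter_cons_of_pos hp, List.find?_cons_of_pos hp]
      have hft : t.filter P = [] := by
        rw [List.filter_eq_nil_iff]
        intro b hb hPb
        have : a = b := h a List.mem_cons_self b (List.mem_cons_of_mem _ hb) hp hPb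
        exact hna (this ▸ hb)
      rw [hft]
      rfl
    · rw [List.filter_cons_of_neg hp, List.find?_cons_of_neg hp]
      exact ih hndt (fun x hx y hy => h x (List.mem_cons_of_mem _ hx) y (List.mem_cons_of_mem _ hy))

lemma labels_nodup : ATTR_LABELS.Nodup := by decide

lemma startswith_eq_decide (s p : List Char) :
    PySem.Chars.startswith s p = decide (p <+: s) := by
  by_cases h : p <+: s
  · rw [decide_eq_true h]
    exact (PySem.Chars.startswith_iff s p).mpr h
  · rw [decide_eq_false h]
    rw [Bool.eq_false_iff]
    intro hc
    exact h ((PySem.Chars.startswith_iff s p).mp hc)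

lemma occsB_eq_occL (r : List Char) : occsB r = occL r := by
  unfold occsB occL
  rw [PySem.List.pyRange_zero_natCast, List.flatMap_map, List.filterMap_eq_flatMap_toList]
  refine List.flatMap_congr ?_
  intro k hk
  have hP : (fun lbl : String =>
      PySem.Chars.startswith (r.drop ((k : Int)).toNat) lbl.toList)
      = (fun l : String => decide (l.toList <+: r.drop k)) := by
    funext lbl
    rw [startswith_eq_decide, Int.toNat_natCast]
  rw [hP]
  rw [filter_unique ATTR_LABELS _ labels_nodup (fun a ha b hb hPa hPb =>
    label_match_unique r k a b ha hb (by simpa using hPa) (by simpa using hPb))]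
  unfold lblAt
  rw [Option.toList_map]


-- ===== VERDICT (by name: the statement is the Claim_ definition above) =====
theorem parse_attribute_pairs_spec : Claim_equal_parse_attribute_pairs := by
  intro line _
  unfold Spec_parse_attribute_pairs parse_attribute_pairs parse_attribute_pairs_alt
  rw [occsB_eq_occL]
  exact pyA_eq_altGo line.toList.length line.toList le_rfl
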